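-- pv_equiv track=rewrite | github.com/HawzhinBlanca/Montage | montage/core/creative_titles.py | _select_best_emojis
-- ===== SOURCE A (Python) =====
-- from typing import List, Dict, Any, Tuple
--
-- def _select_best_emojis(emojis: List[str], max_count: int = 5) -> List[str]:
--     """Select best emojis avoiding duplicates"""
--     seen = set()
--     selected = []
--
--     for emoji in emojis:
--         if emoji not in seen and len(selected) < max_count:
--             seen.add(emoji)
--             selected.append(emoji)
--
--     return selected
-- ===== SOURCE B (Python) =====
-- from typing import List
--
-- def _select_best_emojis(emojis: List[str], max_count: int = 5) -> List[str]:
--     """Select best emojis avoiding duplicates"""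
--     if max_count <= 0 or not emojis:
--         return []
--     head = emojis[0]
--     rest = _select_best_emojis([e for e in emojis[1:] if e != head], max_count - 1)
--     return [head] + rest
-- ===== Notes on version B (the rewrite author's own statement) =====
-- stated objective: alternative
-- what changed: Replaces A's single-pass loop with a seen-set and capacity check by a recursive divide-and-conquer: take the head, filter all its duplicates out of the tail, and recurse with capacity-1; no seen-set or length test is ever maintained.
import Mathlib
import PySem

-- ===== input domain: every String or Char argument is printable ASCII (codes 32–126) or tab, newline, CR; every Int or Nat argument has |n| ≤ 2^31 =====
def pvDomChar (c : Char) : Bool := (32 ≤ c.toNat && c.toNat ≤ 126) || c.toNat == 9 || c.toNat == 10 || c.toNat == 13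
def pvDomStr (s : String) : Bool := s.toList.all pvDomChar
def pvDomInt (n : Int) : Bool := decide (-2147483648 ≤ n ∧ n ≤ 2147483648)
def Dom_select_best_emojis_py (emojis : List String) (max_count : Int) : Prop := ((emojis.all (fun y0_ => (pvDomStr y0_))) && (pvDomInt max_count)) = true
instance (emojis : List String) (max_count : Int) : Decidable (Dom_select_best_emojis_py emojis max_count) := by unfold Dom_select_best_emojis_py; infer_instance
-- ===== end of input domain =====

-- B replaces A's single seen-set/capacity loop by a recursive decomposition: take the head,
-- filter its duplicates out of the tail, recurse with capacity-1 (alternative; similar cost here).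


-- ===== PORT A =====
-- for emoji in emojis: if emoji not in seen and len(selected) < max_count: seen.add(emoji); selected.append(emoji)
def select_best_emojis_py (emojis : List String) (max_count : Int) : List String :=
  (emojis.foldl
    (fun (st : PySem.Set String × List String) emoji =>
      if ¬ PySem.Set.contains st.1 emoji ∧ (st.2.length : Int) < max_count then
        (PySem.Set.add st.1 emoji, st.2 ++ [emoji])
      else st)
    (PySem.Set.empty, [])).2

-- ===== PORT B =====
-- if max_count <= 0 or not emojis: return []
-- head = emojis[0]; rest = recurse([e for e in emojis[1:] if e != head], max_count - 1)
-- return [head] + rest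
def select_best_emojis_py_alt (emojis : List String) (max_count : Int) : List String :=
  if max_count ≤ 0 then []
  else
    match emojis with
    | [] => []
    | head :: tail =>
        head :: select_best_emojis_py_alt (tail.filter (fun e => e != head)) (max_count - 1)
termination_by emojis.length
decreasing_by
  simpa using Nat.lt_succ_of_le (List.length_filter_le _ _)

-- ===== PRECONDITION & SPEC =====
def Spec_select_best_emojis_py (emojis : List String) (max_count : Int) (out : List String) : Prop := out = select_best_emojis_py_alt emojis max_count
instance (emojis : List String) (max_count : Int) (out : List String) : Decidable (Spec_select_best_emojis_py emojis max_count out) := by unfold Spec_select_best_emojis_py; infer_instance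

-- ===== CLAIM (what is proved, stated in full; the proofs are below) =====
def Claim_equal_select_best_emojis_py : Prop := ∀ (emojis : List String) (max_count : Int), Dom_select_best_emojis_py emojis max_count → Spec_select_best_emojis_py emojis max_count (select_best_emojis_py emojis max_count)

-- ===== LEMMAS AND PROOFS =====

-- Set.contains is membership (String has LawfulBEq)
theorem set_contains_iff (s : PySem.Set String) (x : String) :
    PySem.Set.contains s x = true ↔ x ∈ s := by
  simp [PySem.Set.contains]

-- the state list is a prefix of any fold of Set.add over it
theorem prefix_foldl_add (l : List String) (s : PySem.Set String) :
    s <+: l.foldl PySem.Set.add s := by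
  induction l generalizing s with
  | nil => exact List.prefix_rfl
  | cons x xs ih =>
    simp only [List.foldl_cons, PySem.Set.add]
    split
    · exact ih s
    · exact List.IsPrefix.trans ⟨[x], rfl⟩ (ih (s ++ [x]))

-- invariant for A's fold: from state (sel, sel) it computes the clamped prefix of the Set.add fold
theorem loop_invariant (max_count : Int) (l : List String) (sel : List String)
    (hle : sel.length ≤ (max max_count 0).toNat) :
    (l.foldl
      (fun (st : PySem.Set String × List String) emoji =>
        if ¬ PySem.Set.contains st.1 emoji ∧ (st.2.length : Int) < max_count then
          (PySem.Set.add st.1 emoji, st.2 ++ [emoji])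
        else st)
      (sel, sel)).2 = (l.foldl PySem.Set.add sel).take (max max_count 0).toNat := by
  induction l generalizing sel with
  | nil =>
    simpa using (List.take_of_length_le hle).symm
  | cons x xs ih =>
    simp only [List.foldl_cons]
    by_cases hc : PySem.Set.contains sel x
    · have hm : x ∈ sel := (set_contains_iff sel x).mp hc
      have hstep : (if ¬ PySem.Set.contains sel x ∧ ((sel.length : Int) < max_count) then
          (PySem.Set.add sel x, sel ++ [x]) else ((sel : PySem.Set String), sel)) = (sel, sel) := by
        simp [hm]
      have hadd : PySem.Set.add sel x = sel := by
        simp [PySem.Set.add, hm]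
      rw [hstep, hadd, ih sel hle]
    · have hm : x ∉ sel := fun h => hc ((set_contains_iff sel x).mpr h)
      by_cases hlt : (sel.length : Int) < max_count
      · have hstep : (if ¬ PySem.Set.contains sel x ∧ ((sel.length : Int) < max_count) then
            (PySem.Set.add sel x, sel ++ [x]) else ((sel : PySem.Set String), sel)) =
            (sel ++ [x], sel ++ [x]) := by
          simp [hm, hlt, PySem.Set.add]
        have hlen : (sel ++ [x]).length ≤ (max max_count 0).toNat := by
          simp only [List.length_append, List.length_singleton]
          omega
        have hadd : PySem.Set.add sel x = sel ++ [x] := by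
          simp [PySem.Set.add, hm]
        rw [hstep, hadd, ih (sel ++ [x]) hlen]
      · have heq : sel.length = (max max_count 0).toNat := by omega
        have hstep : (if ¬ PySem.Set.contains sel x ∧ ((sel.length : Int) < max_count) then
            (PySem.Set.add sel x, sel ++ [x]) else ((sel : PySem.Set String), sel)) = (sel, sel) := by
          simp [hlt]
        rw [hstep, ih sel hle]
        obtain ⟨t, ht⟩ := prefix_foldl_add xs (PySem.Set.add sel x)
        obtain ⟨t', ht'⟩ := prefix_foldl_add xs (sel : PySem.Set String)
        have hu : PySem.Set.add sel x = sel ++ [x] := by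
          simp [PySem.Set.add, hm]
        rw [← ht, ← ht', hu, List.append_assoc]
        rw [List.take_append_of_le_length (le_of_eq heq.symm),
            List.take_append_of_le_length (le_of_eq heq.symm)]

-- folding Set.add into a state headed by a pushes a out and filters its duplicates
theorem foldl_add_cons (l : List String) (a : String) (s : List String) :
    l.foldl PySem.Set.add (a :: s) = a :: (l.filter (fun e => e != a)).foldl PySem.Set.add s := by
  induction l generalizing s with
  | nil => simp
  | cons x xs ih =>
    by_cases hx : x = a
    · subst hx
      simp only [List.foldl_cons, List.filter_cons]
      have : PySem.Set.add (x :: s) x = x :: s := by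
        simp [PySem.Set.add]
      simp [ih]
    · simp only [List.foldl_cons, List.filter_cons]
      have hadd : PySem.Set.add (a :: s) x = a :: PySem.Set.add s x := by
        simp only [PySem.Set.add]
        by_cases hs : x ∈ s <;> simp [hs, hx]
      simp [hx, hadd, ih]

-- B computes the clamped prefix of the order-preserving dedup
theorem dedup_cons (h : String) (t : List String) :
    PySem.List.dedup (h :: t) = h :: PySem.List.dedup (t.filter (fun e => e != h)) := by
  have hadd : PySem.Set.add ([] : PySem.Set String) h = [h] := by
    simp [PySem.Set.add, PySem.Set.contains]
  rw [PySem.List.dedup_eq_ofList, PySem.List.dedup_eq_ofList,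
      PySem.Set.ofList_eq_foldl, PySem.Set.ofList_eq_foldl]
  simp only [List.foldl_cons, hadd]
  exact foldl_add_cons t h []

theorem alt_eq_take_dedup (emojis : List String) (max_count : Int) :
    select_best_emojis_py_alt emojis max_count
      = (PySem.List.dedup emojis).take (max max_count 0).toNat := by
  induction emojis, max_count using select_best_emojis_py_alt.induct with
  | case1 l m h0 =>
    have h : (max m 0).toNat = 0 := by omega
    rw [select_best_emojis_py_alt.eq_def, if_pos h0, h, List.take_zero]
  | case2 m h0 =>
    rw [select_best_emojis_py_alt, if_neg h0]
    simp [PySem.List.dedup_eq_ofList, PySem.Set.ofList_eq_foldl]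
  | case3 m h0 head tail ih =>
    simp only [List.unattach_filter, List.unattach_attach] at ih
    rw [select_best_emojis_py_alt, if_neg h0, ih, dedup_cons]
    have hsucc : (max m 0).toNat = (max (m - 1) 0).toNat + 1 := by omega
    rw [hsucc, List.take_succ_cons]

-- ===== VERDICT (by name: the statement is the Claim_ definition above) =====
theorem select_best_emojis_py_spec : Claim_equal_select_best_emojis_py := by
  intro emojis max_count _
  show select_best_emojis_py emojis max_count = select_best_emojis_py_alt emojis max_count
  rw [alt_eq_take_dedup, PySem.List.dedup_eq_ofList, PySem.Set.ofList_eq_foldl]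
  unfold select_best_emojis_py
  exact loop_invariant max_count emojis [] (by simp)
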